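-- pv_equiv track=rewrite | github.com/Sunil-Kumar-P/competitive_programming | Accenture_Coding_Questions/differenceofSum.py | differenceofSum
-- ===== SOURCE A (Python) =====
-- def differenceofSum(n,m):
--     diff, SumN, SumM = 0,0,0
--     for i in range(n+1):
--         if(i%m==0):
--             SumM+=i
--         else:
--             SumN+=i
--     diff=SumN-SumM
--     return diff
-- ===== SOURCE B (Python) =====
-- def differenceofSum(n, m):
--     # Closed-form arithmetic series instead of a loop: O(1).
--     if n < 0:
--         return 0
--     a = abs(m)
--     k = n // a
--     total = n * (n + 1) // 2
--     divsum = a * k * (k + 1) // 2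
--     return total - 2 * divsum
-- ===== Notes on version B (the rewrite author's own statement) =====
-- stated objective: faster
-- what changed: Replaced the O(n) loop with closed-form arithmetic-series formulas (Gauss sum and sum of multiples of |m| via n//|m|).
import Mathlib
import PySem

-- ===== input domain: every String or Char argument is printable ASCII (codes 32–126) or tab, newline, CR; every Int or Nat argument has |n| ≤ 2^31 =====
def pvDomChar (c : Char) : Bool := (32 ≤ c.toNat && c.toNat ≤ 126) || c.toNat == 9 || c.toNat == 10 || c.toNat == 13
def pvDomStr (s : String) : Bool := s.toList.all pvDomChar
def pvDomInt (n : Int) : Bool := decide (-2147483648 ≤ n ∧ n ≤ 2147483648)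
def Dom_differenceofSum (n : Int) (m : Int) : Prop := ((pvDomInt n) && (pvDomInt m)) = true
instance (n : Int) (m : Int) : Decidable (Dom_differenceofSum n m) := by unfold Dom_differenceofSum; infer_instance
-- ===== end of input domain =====

-- B replaces A's O(n) loop by closed-form arithmetic-series formulas (objective: faster, asymptotic).


-- ===== PORT A =====
def differenceofSum (n : Int) (m : Int) : Int :=
  -- state (SumN, SumM); diff initialised to 0 is never read before the final assignment
  let st := (PySem.List.pyRange 0 (n + 1) 1).foldl
    (fun (s : Int × Int) i =>
      if PySem.Int.mod i m = 0 then (s.1, s.2 + i) else (s.1 + i, s.2))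
    (0, 0)
  st.1 - st.2

-- ===== PORT B =====
def differenceofSum_alt (n : Int) (m : Int) : Int :=
  if n < 0 then 0
  else
    let a : Int := (m.natAbs : Int)          -- abs(m)
    let k := PySem.Int.floordiv n a
    let total := PySem.Int.floordiv (n * (n + 1)) 2
    let divsum := PySem.Int.floordiv (a * k * (k + 1)) 2
    total - 2 * divsum

-- ===== PRECONDITION & SPEC =====
-- Pre_ excludes m = 0, on which Python A raises ZeroDivisionError (i % 0).
def Pre_differenceofSum (n : Int) (m : Int) : Prop := m ≠ 0
instance (n : Int) (m : Int) : Decidable (Pre_differenceofSum n m) := by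
  unfold Pre_differenceofSum; infer_instance
def pvWitness_differenceofSum : Int × Int := (10, 3)

def Spec_differenceofSum (n : Int) (m : Int) (out : Int) : Prop := out = differenceofSum_alt n m
instance (n : Int) (m : Int) (out : Int) : Decidable (Spec_differenceofSum n m out) := by
  unfold Spec_differenceofSum; infer_instance

-- ===== CLAIM (what is proved, stated in full; the proofs are below) =====
def Claim_equal_differenceofSum : Prop := ∀ (n : Int) (m : Int), Dom_differenceofSum n m → Pre_differenceofSum n m → Spec_differenceofSum n m (differenceofSum n m)

-- ===== LEMMAS AND PROOFS =====

-- Gauss sum 0 + 1 + … + q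
def pvG : Nat → Nat
  | 0 => 0
  | q + 1 => pvG q + (q + 1)

theorem pvG_two_mul (q : Nat) : 2 * pvG q = q * (q + 1) := by
  induction q with
  | zero => rfl
  | succ q ih => simp only [pvG]; ring_nf; ring_nf at ih; omega

-- sum of the multiples of a below t
def pvM (a t : Nat) : Nat := a * pvG ((t - 1) / a)

theorem pv_fold_eq (m : Int) (hm : m ≠ 0) (t : Nat) :
    ((PySem.List.pyRange 0 (t : Int) 1).foldl
      (fun (s : Int × Int) i =>
        if PySem.Int.mod i m = 0 then (s.1, s.2 + i) else (s.1 + i, s.2))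
      (0, 0)) =
    ((pvG (t - 1) : Int) - (pvM m.natAbs t : Int), (pvM m.natAbs t : Int)) := by
  induction t with
  | zero =>
    rw [PySem.List.pyRange_one_eq_nil (by norm_num)]
    simp [pvM, pvG]
  | succ t ih =>
    have hcast : ((t + 1 : Nat) : Int) = (t : Int) + 1 := by push_cast; ring
    rw [hcast, PySem.List.pyRange_one_succ_right (by positivity), List.foldl_append, ih]
    simp only [List.foldl_cons, List.foldl_nil]
    have hdvd : (PySem.Int.mod (t : Int) m = 0) ↔ m.natAbs ∣ t := by
      rw [PySem.Int.mod_eq_zero_iff_dvd, ← Int.natAbs_dvd, Int.natCast_dvd_natCast]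
    have hG : pvG t = pvG (t - 1) + t := by
      cases t with
      | zero => simp [pvG]
      | succ s => simp [pvG]
    by_cases hd : m.natAbs ∣ t
    · -- i = t is a multiple of |m|: it goes to SumM
      rw [if_pos (hdvd.mpr hd)]
      have hM : pvM m.natAbs (t + 1) = pvM m.natAbs t + t := by
        cases t with
        | zero => simp [pvM]
        | succ s =>
          have hq : (s + 1) / m.natAbs = s / m.natAbs + 1 := by
            rw [Nat.succ_div, if_pos hd]
          have hself : m.natAbs * ((s + 1) / m.natAbs) = s + 1 := Nat.mul_div_cancel' hd
          unfold pvM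
          simp only [Nat.add_sub_cancel]
          rw [hq, pvG, Nat.mul_add, ← hq, hself]
      rw [Prod.ext_iff]
      refine ⟨?_, ?_⟩ <;> simp only [Nat.add_sub_cancel, hG, hM] <;> push_cast <;> ring
    · -- i = t is not a multiple: it goes to SumN (t > 0 since every |m| divides 0)
      rw [if_neg (fun h => hd (hdvd.mp h))]
      have hpos : 0 < t := Nat.pos_of_ne_zero (fun h0 => hd (h0 ▸ dvd_zero _))
      have hM : pvM m.natAbs (t + 1) = pvM m.natAbs t := by
        obtain ⟨s, rfl⟩ : ∃ s, t = s + 1 := ⟨t - 1, by omega⟩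
        unfold pvM
        simp only [Nat.add_sub_cancel]
        rw [Nat.succ_div, if_neg hd, Nat.add_zero]
      rw [Prod.ext_iff]
      refine ⟨?_, ?_⟩ <;> simp only [Nat.add_sub_cancel, hG, hM] <;> push_cast <;> ring

-- ===== VERDICT (by name: the statement is the Claim_ definition above) =====
theorem differenceofSum_spec : Claim_equal_differenceofSum := by
  intro n m _ hm
  unfold Spec_differenceofSum differenceofSum differenceofSum_alt
  by_cases hn : n < 0
  · rw [PySem.List.pyRange_one_eq_nil (by omega)]
    simp [hn]
  · push_neg at hn
    have hnt : n = ((n.toNat : Nat) : Int) := (Int.toNat_of_nonneg hn).symm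
    have ht : n + 1 = ((n.toNat + 1 : Nat) : Int) := by omega
    rw [ht, pv_fold_eq m hm (n.toNat + 1)]
    have ha : 0 < m.natAbs := Int.natAbs_pos.mpr hm
    simp only [if_neg (not_lt.mpr hn), Nat.add_sub_cancel]
    -- evaluate B's floordivs in Nat
    have hk : PySem.Int.floordiv n (m.natAbs : Int) = ((n.toNat / m.natAbs : Nat) : Int) := by
      rw [hnt]; exact PySem.Int.floordiv_natCast n.toNat m.natAbs
    have htotal : PySem.Int.floordiv (n * ((n.toNat + 1 : Nat) : Int)) 2 = ((pvG n.toNat : Nat) : Int) := by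
      have h1 : n * ((n.toNat + 1 : Nat) : Int) = ((n.toNat * (n.toNat + 1) : Nat) : Int) := by
        push_cast [Int.toNat_of_nonneg hn]; ring
      rw [h1]
      rw [show ((2 : Int)) = ((2 : Nat) : Int) from rfl, PySem.Int.floordiv_natCast]
      congr 1
      have := pvG_two_mul n.toNat
      omega
    have hdiv : PySem.Int.floordiv ((m.natAbs : Int) * ((n.toNat / m.natAbs : Nat) : Int)
        * (((n.toNat / m.natAbs : Nat) : Int) + 1)) 2 = ((pvM m.natAbs (n.toNat + 1) : Nat) : Int) := by
      set q := n.toNat / m.natAbs with hq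
      have h1 : (m.natAbs : Int) * ((q : Nat) : Int) * (((q : Nat) : Int) + 1)
          = ((m.natAbs * q * (q + 1) : Nat) : Int) := by push_cast; ring
      rw [h1, show ((2 : Int)) = ((2 : Nat) : Int) from rfl, PySem.Int.floordiv_natCast]
      congr 1
      have h2 : 2 * pvG q = q * (q + 1) := pvG_two_mul q
      have h3 : m.natAbs * q * (q + 1) = 2 * (m.natAbs * pvG q) := by
        rw [Nat.mul_assoc, ← h2]; ring
      rw [h3, Nat.mul_div_cancel_left _ (by norm_num)]
      unfold pvM
      rw [Nat.add_sub_cancel, hq]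
    rw [hk, htotal, hdiv]
    ring
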